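-- pv_equiv track=rewrite | github.com/LT-IntroToAI-SY2526/assignment-1-intro-to-python-mcarmona13 | a1.py | find_word_patterns
-- ===== SOURCE A (Python) =====
-- def find_word_patterns(sentence):
--     """
--     MY APPROACH:
--     1. Split sentence into words
--     2. For each word, check all pattern conditions
--     3. Add matching words to appropriate lists
--     4. Return dictionary with all pattern lists
--     """
--     words = sentence.split()
--     same_letter = []
--     palindromes = []
--     only_vowels = []
--     long_words = []
--
--     vowels = "aeiouAEIOU"
--
--     for word in words:
--         # removes punctuation for pattern checking
--         clean_word = ""
--         for char in word:
--             # FIXED: was isaplha(), should be isalpha()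
--             if char.isalpha():
--                 clean_word += char
--
--         if not clean_word: # skips if no letters
--             continue
--
--         # FIXED: checks if starts and ends with same letter (was missing this logic)
--         if clean_word[0].lower() == clean_word[-1].lower():
--             same_letter.append(word)
--
--         # FIXED: check if palindrome (was putting this in same_letter check)
--         if clean_word.lower() == clean_word.lower()[::-1]:
--             palindromes.append(word)
--
--         # check if only vowels
--         all_vowels = True
--         for char in clean_word:
--             if char not in vowels:
--                 all_vowels = False
--                 break
--         if all_vowels:
--             only_vowels.append(word)  # FIXED: was only_vowels.qppend
--
--         # check if longer than 5 characters
--         if len(clean_word) > 5: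
--             long_words.append(word)  # FIXED: was long_words.qppend(word)
--
--     return {
--         "same_letter": same_letter,
--         "palindromes": palindromes,
--         "only_vowels": only_vowels,
--         "long_words": long_words
--     }
-- ===== SOURCE B (Python) =====
-- VOWELS = "aeiouAEIOU"
--
--
-- def _first_alpha(word):
--     for c in word:
--         if c.isalpha():
--             return c
--
--
-- def _last_alpha(word):
--     for c in reversed(word):
--         if c.isalpha():
--             return c
--
--
-- def _pal(cs):
--     # two-pointer palindrome test on the raw characters, skipping non-letters;
--     # no cleaned string is ever built
--     i, j = 0, len(cs) - 1
--     while i < j: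
--         if not cs[i].isalpha():
--             i += 1
--         elif not cs[j].isalpha():
--             j -= 1
--         elif cs[i].lower() != cs[j].lower():
--             return False
--         else:
--             i += 1
--             j -= 1
--     return True
--
--
-- def _classify(word):
--     n = sum(1 for c in word if c.isalpha())
--     if n == 0:
--         return []
--     tags = []
--     if _first_alpha(word).lower() == _last_alpha(word).lower():
--         tags.append("same_letter")
--     if _pal(list(word)):
--         tags.append("palindromes")
--     if not any(c.isalpha() and c not in VOWELS for c in word):
--         tags.append("only_vowels")
--     if n > 5:
--         tags.append("long_words")
--     return tags
--
--
-- def find_word_patterns(sentence):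
--     result = {"same_letter": [], "palindromes": [], "only_vowels": [], "long_words": []}
--     for word in sentence.split():
--         for key in _classify(word):
--             result[key].append(word)
--     return result
-- ===== Notes on version B (the rewrite author's own statement) =====
-- stated objective: alternative
-- what changed: B never builds a cleaned copy of a word: it classifies each raw word with directed scans (first/last alphabetic character from opposite ends, a recursive two-pointer palindrome test that skips punctuation in place, a letter count, and an any-scan for a non-vowel letter) into a list of category tags, then a driver appends the word to the tagged lists of the result dict.
import Mathlib
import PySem

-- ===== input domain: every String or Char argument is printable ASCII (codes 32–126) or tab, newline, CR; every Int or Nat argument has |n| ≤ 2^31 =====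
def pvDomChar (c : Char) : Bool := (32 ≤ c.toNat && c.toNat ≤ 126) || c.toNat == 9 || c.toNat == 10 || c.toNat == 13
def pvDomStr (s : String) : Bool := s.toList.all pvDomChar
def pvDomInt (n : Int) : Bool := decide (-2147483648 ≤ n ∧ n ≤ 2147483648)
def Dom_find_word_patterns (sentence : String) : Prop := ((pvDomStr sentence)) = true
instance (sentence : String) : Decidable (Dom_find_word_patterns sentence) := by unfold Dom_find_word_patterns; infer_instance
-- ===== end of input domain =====

-- B classifies each raw word by directed scans (first/last letter from opposite ends, a
-- two-pointer punctuation-skipping palindrome test, a letter count, an any-scan for a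
-- non-vowel letter) into category tags and appends into a result dict — it never builds
-- A's cleaned word; objective: alternative.

-- ===== PORT A =====
-- the inner 'for char in clean_word: … break' loop checking all-vowels
def allVowelsLoopA (vowels : List Char) : List Char → Bool
  | [] => true
  | c :: cs => if !(vowels.contains c) then false else allVowelsLoopA vowels cs

-- the body of A's 'for word in words' loop, threading the four accumulator lists
def stepA (vowels : List Char)
    (st : List String × List String × List String × List String) (word : String) :
    List String × List String × List String × List String :=
  let clean := word.toList.foldl (fun acc c => if PySem.Chars.isalpha c then acc ++ [c] else acc) []
  if clean = [] then st
  else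
    let sl := if PySem.Chars.lowerChar (clean.headD 'a') = PySem.Chars.lowerChar (clean.getLastD 'a')
              then st.1 ++ [word] else st.1
    -- clean.lower()[::-1] ported as reverse (exact: a [::-1] slice is List.reverse)
    let pal := if PySem.Chars.lower clean = (PySem.Chars.lower clean).reverse
               then st.2.1 ++ [word] else st.2.1
    let ov := if allVowelsLoopA vowels clean then st.2.2.1 ++ [word] else st.2.2.1
    let lw := if clean.length > 5 then st.2.2.2 ++ [word] else st.2.2.2
    (sl, pal, ov, lw)

def find_word_patterns (sentence : String) : List (String × List String) :=
  let words := PySem.Str.split₀ sentence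
  let vowels := "aeiouAEIOU".toList
  let st := words.foldl (stepA vowels) ([], [], [], [])
  [("same_letter", st.1), ("palindromes", st.2.1), ("only_vowels", st.2.2.1), ("long_words", st.2.2.2)]

-- ===== PORT B =====
def vowelsB : List Char := "aeiouAEIOU".toList

-- _first_alpha: forward scan for the first alphabetic character (None if there is none)
def firstAlphaB : List Char → Option Char
  | [] => none
  | c :: cs => if PySem.Chars.isalpha c then some c else firstAlphaB cs

-- _pal's while loop: two pointers i ≤ j; cs[i]/cs[j] are always in range when read
-- (0 ≤ i < j ≤ len-1), so '.getD _ ' '' is Python's in-range cs[i]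
def palLoop (cs : List Char) (i j : Nat) : Bool :=
  if i < j then
    if !(PySem.Chars.isalpha (cs.getD i ' ')) then palLoop cs (i + 1) j
    else if !(PySem.Chars.isalpha (cs.getD j ' ')) then palLoop cs i (j - 1)
    else if PySem.Chars.lowerChar (cs.getD i ' ') ≠ PySem.Chars.lowerChar (cs.getD j ' ')
    then false
    else palLoop cs (i + 1) (j - 1)
  else true
termination_by j - i
decreasing_by all_goals omega

-- _pal: iterative two-pointer palindrome test on the raw characters, skipping non-letters
def palB (cs : List Char) : Bool := palLoop cs 0 (cs.length - 1)

-- _classify: the list of category tags of one raw word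
-- (_first_alpha/_last_alpha return a character whenever n ≠ 0; '.getD '\a'' ports the
-- guarded '.lower()' call — the default is never read since the options are 'some')
def classifyB (word : String) : List String :=
  let cs := word.toList
  let n := cs.countP PySem.Chars.isalpha
  if n = 0 then []
  else
    (if PySem.Chars.lowerChar ((firstAlphaB cs).getD 'a')
        = PySem.Chars.lowerChar ((firstAlphaB cs.reverse).getD 'a')
     then ["same_letter"] else []) ++
    (if palB cs then ["palindromes"] else []) ++
    (if !(cs.any (fun c => PySem.Chars.isalpha c && !(vowelsB.contains c)))
     then ["only_vowels"] else []) ++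
    (if n > 5 then ["long_words"] else [])

def find_word_patterns_alt (sentence : String) : List (String × List String) :=
  let init : PySem.Dict String (List String) :=
    PySem.Dict.ofList [("same_letter", []), ("palindromes", []), ("only_vowels", []), ("long_words", [])]
  let result := (PySem.Str.split₀ sentence).foldl
    (fun d w => (classifyB w).foldl (fun d k => d.modify k [] (fun l => l ++ [w])) d) init
  result.items

-- ===== PRECONDITION & SPEC =====
def Spec_find_word_patterns (sentence : String) (out : List (String × List String)) : Prop := out = find_word_patterns_alt sentence
instance (sentence : String) (out : List (String × List String)) : Decidable (Spec_find_word_patterns sentence out) := by unfold Spec_find_word_patterns; infer_instance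

-- ===== CLAIM (what is proved, stated in full; the proofs are below) =====
def Claim_equal_find_word_patterns : Prop := ∀ (sentence : String), Dom_find_word_patterns sentence → Spec_find_word_patterns sentence (find_word_patterns sentence)

-- ===== LEMMAS AND PROOFS =====

theorem clean_eq_filter (l : List Char) (acc : List Char) :
    l.foldl (fun acc c => if PySem.Chars.isalpha c then acc ++ [c] else acc) acc
      = acc ++ l.filter PySem.Chars.isalpha := by
  induction l generalizing acc with
  | nil => simp
  | cons c cs ih =>
    simp only [List.foldl_cons, List.filter_cons]
    by_cases h : PySem.Chars.isalpha c = true <;> simp [h, ih]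

theorem allVowels_eq_all (v : List Char) (cs : List Char) :
    allVowelsLoopA v cs = cs.all (fun c => v.contains c) := by
  induction cs with
  | nil => rfl
  | cons c cs ih =>
    simp only [allVowelsLoopA, List.all_cons, ih]
    by_cases h : v.contains c = true
    · simp
    · simp at h
      simp [h]

theorem firstAlphaB_eq_head (cs : List Char) :
    firstAlphaB cs = (cs.filter PySem.Chars.isalpha).head? := by
  induction cs with
  | nil => rfl
  | cons c rest ih =>
    simp only [firstAlphaB, List.filter_cons]
    by_cases h : PySem.Chars.isalpha c = true <;> simp [h, ih]

-- the window cs[i..j] the two pointers are looking at (proof-side only)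
def segPV (cs : List Char) (i j : Nat) : List Char := (cs.drop i).take (j + 1 - i)

theorem seg_empty (cs : List Char) (i j : Nat) (h : cs.length ≤ i) : segPV cs i j = [] := by
  unfold segPV
  simp [List.drop_eq_nil_of_le h]

theorem seg_cons (cs : List Char) (i j : Nat) (hlen : i < cs.length) (hij : i ≤ j) :
    segPV cs i j = cs[i] :: segPV cs (i + 1) j := by
  unfold segPV
  rw [List.drop_eq_getElem_cons hlen]
  rw [show j + 1 - i = (j + 1 - (i + 1)) + 1 by omega, List.take_succ_cons]

theorem seg_snoc (cs : List Char) (i j : Nat) (hij : i ≤ j) (hj1 : 1 ≤ j) :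
    segPV cs i j = segPV cs i (j - 1) ++ (cs[j]?).toList := by
  unfold segPV
  rw [show j + 1 - i = (j - i) + 1 by omega, List.take_add_one,
    show (j - 1) + 1 - i = j - i by omega, List.getElem?_drop,
    show i + (j - i) = j by omega]

theorem short_palin (l : List Char) (h : l.length ≤ 1) : l = l.reverse := by
  match l with
  | [] => rfl
  | [a] => rfl
  | a :: b :: t => simp at h

theorem getD_in (cs : List Char) (k : Nat) (h : k < cs.length) : cs.getD k ' ' = cs[k] := by
  rw [List.getD_eq_getElem?_getD, List.getElem?_eq_getElem h, Option.getD_some]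

theorem alpha_lt (cs : List Char) (k : Nat)
    (h : PySem.Chars.isalpha (cs.getD k ' ') = true) : k < cs.length := by
  by_contra hc
  rw [List.getD_eq_getElem?_getD, List.getElem?_eq_none (by omega), Option.getD_none] at h
  exact absurd h (by decide)

theorem seg_filter_left (cs : List Char) (i j : Nat) (hij : i < j)
    (hi : PySem.Chars.isalpha (cs.getD i ' ') = false) :
    (segPV cs i j).filter PySem.Chars.isalpha = (segPV cs (i + 1) j).filter PySem.Chars.isalpha := by
  by_cases hlen : i < cs.length
  · have hi' : PySem.Chars.isalpha cs[i] = false := by rwa [getD_in cs i hlen] at hi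
    rw [seg_cons cs i j hlen (le_of_lt hij), List.filter_cons]
    simp [hi']
  · rw [seg_empty cs i j (by omega), seg_empty cs (i + 1) j (by omega)]

theorem seg_filter_right (cs : List Char) (i j : Nat) (hij : i < j)
    (hj : PySem.Chars.isalpha (cs.getD j ' ') = false) :
    (segPV cs i j).filter PySem.Chars.isalpha = (segPV cs i (j - 1)).filter PySem.Chars.isalpha := by
  rw [seg_snoc cs i j (le_of_lt hij) (by omega)]
  by_cases hlen : j < cs.length
  · have hj' : PySem.Chars.isalpha cs[j] = false := by rwa [getD_in cs j hlen] at hj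
    rw [List.getElem?_eq_getElem hlen]
    simp [List.filter_append, hj']
  · rw [List.getElem?_eq_none (by omega)]
    simp

theorem seg_both (cs : List Char) (i j : Nat) (hij : i < j)
    (hilen : i < cs.length) (hjlen : j < cs.length)
    (hi : PySem.Chars.isalpha cs[i] = true) (hj : PySem.Chars.isalpha cs[j] = true) :
    ((segPV cs i j).filter PySem.Chars.isalpha).map PySem.Chars.lowerChar
      = PySem.Chars.lowerChar cs[i]
          :: ((segPV cs (i + 1) (j - 1)).filter PySem.Chars.isalpha).map PySem.Chars.lowerChar
          ++ [PySem.Chars.lowerChar cs[j]] := by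
  rw [seg_cons cs i j hilen (le_of_lt hij), seg_snoc cs (i + 1) j (by omega) (by omega)]
  rw [List.getElem?_eq_getElem hjlen]
  simp [List.filter_append, hi, hj]

theorem palLoop_eq (cs : List Char) (i j : Nat) :
    palLoop cs i j
      = decide (((segPV cs i j).filter PySem.Chars.isalpha).map PySem.Chars.lowerChar
        = (((segPV cs i j).filter PySem.Chars.isalpha).map PySem.Chars.lowerChar).reverse) := by
  induction i, j using palLoop.induct cs with
  | case1 i j hij hi ih =>
    rw [palLoop, if_pos hij, if_pos hi, ih]
    rw [Bool.not_eq_true'] at hi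
    rw [seg_filter_left cs i j hij hi]
  | case2 i j hij hi hj ih =>
    rw [palLoop, if_pos hij, if_neg hi, if_pos hj, ih]
    rw [Bool.not_eq_true'] at hj
    rw [seg_filter_right cs i j hij hj]
  | case3 i j hij hi hj hne =>
    rw [palLoop, if_pos hij, if_neg hi, if_neg hj, if_pos hne]
    rw [Bool.not_eq_true'] at hi hj
    have hi' : PySem.Chars.isalpha (cs.getD i ' ') = true := by
      cases h : PySem.Chars.isalpha (cs.getD i ' ') with
      | false => exact absurd h hi
      | true => rfl
    have hj' : PySem.Chars.isalpha (cs.getD j ' ') = true := by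
      cases h : PySem.Chars.isalpha (cs.getD j ' ') with
      | false => exact absurd h hj
      | true => rfl
    have hilen := alpha_lt cs i hi'
    have hjlen := alpha_lt cs j hj'
    rw [getD_in cs i hilen] at hi' hne
    rw [getD_in cs j hjlen] at hj' hne
    rw [seg_both cs i j hij hilen hjlen hi' hj']
    simp [hne]
  | case4 i j hij hi hj hne ih =>
    rw [palLoop, if_pos hij, if_neg hi, if_neg hj, if_neg hne, ih]
    rw [Bool.not_eq_true'] at hi hj
    rw [not_not] at hne
    have hi' : PySem.Chars.isalpha (cs.getD i ' ') = true := by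
      cases h : PySem.Chars.isalpha (cs.getD i ' ') with
      | false => exact absurd h hi
      | true => rfl
    have hj' : PySem.Chars.isalpha (cs.getD j ' ') = true := by
      cases h : PySem.Chars.isalpha (cs.getD j ' ') with
      | false => exact absurd h hj
      | true => rfl
    have hilen := alpha_lt cs i hi'
    have hjlen := alpha_lt cs j hj'
    rw [getD_in cs i hilen] at hi' hne
    rw [getD_in cs j hjlen] at hj' hne
    rw [seg_both cs i j hij hilen hjlen hi' hj']
    simp [hne]
  | case5 i j hij =>
    rw [palLoop, if_neg hij]
    have hlen : (segPV cs i j).length ≤ 1 := by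
      unfold segPV
      calc ((cs.drop i).take (j + 1 - i)).length ≤ j + 1 - i := List.length_take_le _ _
        _ ≤ 1 := by omega
    have h2 : (((segPV cs i j).filter PySem.Chars.isalpha).map PySem.Chars.lowerChar).length ≤ 1 := by
      rw [List.length_map]
      exact le_trans (List.length_filter_le _ _) hlen
    rw [eq_comm, decide_eq_true_iff]
    exact short_palin _ h2

theorem palB_eq (cs : List Char) :
    palB cs = decide ((cs.filter PySem.Chars.isalpha).map PySem.Chars.lowerChar
      = ((cs.filter PySem.Chars.isalpha).map PySem.Chars.lowerChar).reverse) := by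
  unfold palB
  rw [palLoop_eq]
  have hseg : segPV cs 0 (cs.length - 1) = cs := by
    unfold segPV
    rw [List.drop_zero]
    exact List.take_of_length_le (by omega)
  rw [hseg]

-- one word: B's tag list in terms of A's clean word and A's four conditions
theorem classifyB_chars (word : String) :
    classifyB word =
      (if word.toList.filter PySem.Chars.isalpha = [] then []
       else
         (if PySem.Chars.lowerChar ((word.toList.filter PySem.Chars.isalpha).headD 'a')
             = PySem.Chars.lowerChar ((word.toList.filter PySem.Chars.isalpha).getLastD 'a')
          then ["same_letter"] else []) ++
         (if PySem.Chars.lower (word.toList.filter PySem.Chars.isalpha)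
             = (PySem.Chars.lower (word.toList.filter PySem.Chars.isalpha)).reverse
          then ["palindromes"] else []) ++
         (if allVowelsLoopA vowelsB (word.toList.filter PySem.Chars.isalpha)
          then ["only_vowels"] else []) ++
         (if (word.toList.filter PySem.Chars.isalpha).length > 5
          then ["long_words"] else [])) := by
  have hlow : ∀ l : List Char, PySem.Chars.lower l = l.map PySem.Chars.lowerChar := by
    intro l; simp [PySem.Chars.lower]
  unfold classifyB
  simp only [List.countP_eq_length_filter, List.length_eq_zero_iff, hlow]
  by_cases hn : word.toList.filter PySem.Chars.isalpha = []
  · simp [hn]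
  · have e1 : firstAlphaB word.toList = (word.toList.filter PySem.Chars.isalpha).head? :=
      firstAlphaB_eq_head _
    have e2 : firstAlphaB word.toList.reverse
        = (word.toList.filter PySem.Chars.isalpha).getLast? := by
      rw [firstAlphaB_eq_head, List.filter_reverse, List.head?_reverse]
    have e4 : (!(word.toList.any fun c => PySem.Chars.isalpha c && !(vowelsB.contains c)))
        = allVowelsLoopA vowelsB (word.toList.filter PySem.Chars.isalpha) := by
      rw [allVowels_eq_all, List.all_eq_not_any_not, List.any_filter]
    simp only [hn, if_false, e1, e2, palB_eq, e4, List.headD_eq_head?_getD,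
      List.getLastD_eq_getLast?, decide_eq_true_eq]

-- the four result keys: modifying one of them in the literal dict, and reading the items back
theorem mod4_sl (a b c d : List String) (w : String) :
    ((PySem.Dict.ofList [("same_letter", a), ("palindromes", b), ("only_vowels", c), ("long_words", d)]).modify "same_letter" [] (fun l => l ++ [w]))
      = PySem.Dict.ofList [("same_letter", a ++ [w]), ("palindromes", b), ("only_vowels", c), ("long_words", d)] := by
  simp [PySem.Dict.ofList, PySem.Dict.update, PySem.Dict.modify, PySem.Dict.insert,
    PySem.Dict.contains, PySem.Dict.getD, PySem.Dict.get?, PySem.Dict.empty, List.foldl]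

theorem mod4_pal (a b c d : List String) (w : String) :
    ((PySem.Dict.ofList [("same_letter", a), ("palindromes", b), ("only_vowels", c), ("long_words", d)]).modify "palindromes" [] (fun l => l ++ [w]))
      = PySem.Dict.ofList [("same_letter", a), ("palindromes", b ++ [w]), ("only_vowels", c), ("long_words", d)] := by
  simp [PySem.Dict.ofList, PySem.Dict.update, PySem.Dict.modify, PySem.Dict.insert,
    PySem.Dict.contains, PySem.Dict.getD, PySem.Dict.get?, PySem.Dict.empty, List.foldl]

theorem mod4_ov (a b c d : List String) (w : String) :
    ((PySem.Dict.ofList [("same_letter", a), ("palindromes", b), ("only_vowels", c), ("long_words", d)]).modify "only_vowels" [] (fun l => l ++ [w]))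
      = PySem.Dict.ofList [("same_letter", a), ("palindromes", b), ("only_vowels", c ++ [w]), ("long_words", d)] := by
  simp [PySem.Dict.ofList, PySem.Dict.update, PySem.Dict.modify, PySem.Dict.insert,
    PySem.Dict.contains, PySem.Dict.getD, PySem.Dict.get?, PySem.Dict.empty, List.foldl]

theorem mod4_lw (a b c d : List String) (w : String) :
    ((PySem.Dict.ofList [("same_letter", a), ("palindromes", b), ("only_vowels", c), ("long_words", d)]).modify "long_words" [] (fun l => l ++ [w]))
      = PySem.Dict.ofList [("same_letter", a), ("palindromes", b), ("only_vowels", c), ("long_words", d ++ [w])] := by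
  simp [PySem.Dict.ofList, PySem.Dict.update, PySem.Dict.modify, PySem.Dict.insert,
    PySem.Dict.contains, PySem.Dict.getD, PySem.Dict.get?, PySem.Dict.empty, List.foldl]

theorem items4 (a b c d : List String) :
    (PySem.Dict.ofList [("same_letter", a), ("palindromes", b), ("only_vowels", c), ("long_words", d)]).items
      = [("same_letter", a), ("palindromes", b), ("only_vowels", c), ("long_words", d)] := by
  simp [PySem.Dict.ofList, PySem.Dict.update, PySem.Dict.insert, PySem.Dict.contains,
    PySem.Dict.empty, List.foldl]

-- the per-word dict step equals A's per-word tuple step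
theorem step_dict (w : String) (sl pal ov lw : List String) :
    (classifyB w).foldl (fun d k => d.modify k [] (fun l => l ++ [w]))
        (PySem.Dict.ofList [("same_letter", sl), ("palindromes", pal), ("only_vowels", ov), ("long_words", lw)])
      = (fun st : List String × List String × List String × List String =>
          PySem.Dict.ofList [("same_letter", st.1), ("palindromes", st.2.1),
            ("only_vowels", st.2.2.1), ("long_words", st.2.2.2)])
          (stepA vowelsB (sl, pal, ov, lw) w) := by
  rw [classifyB_chars]
  simp only [stepA, clean_eq_filter, List.nil_append]
  by_cases h0 : w.toList.filter PySem.Chars.isalpha = []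
  · simp [h0]
  · rw [if_neg h0, if_neg h0]
    dsimp only
    split_ifs with c1 c2 c3 c4 <;>
      simp only [List.cons_append, List.nil_append, List.append_nil, List.foldl_cons,
        List.foldl_nil, mod4_sl, mod4_pal, mod4_ov, mod4_lw]

theorem fold_dict (ws : List String) (sl pal ov lw : List String) :
    ws.foldl (fun d w => (classifyB w).foldl (fun d k => d.modify k [] (fun l => l ++ [w])) d)
        (PySem.Dict.ofList [("same_letter", sl), ("palindromes", pal), ("only_vowels", ov), ("long_words", lw)])
      = (fun st : List String × List String × List String × List String =>
          PySem.Dict.ofList [("same_letter", st.1), ("palindromes", st.2.1),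
            ("only_vowels", st.2.2.1), ("long_words", st.2.2.2)])
          (ws.foldl (stepA vowelsB) (sl, pal, ov, lw)) := by
  induction ws generalizing sl pal ov lw with
  | nil => rfl
  | cons w ws ih =>
    simp only [List.foldl_cons]
    rw [step_dict]
    rcases hst : stepA vowelsB (sl, pal, ov, lw) w with ⟨a, b, c, d⟩
    exact ih a b c d

-- ===== VERDICT (by name: the statement is the Claim_ definition above) =====
theorem find_word_patterns_spec : Claim_equal_find_word_patterns := by
  intro sentence _
  unfold Spec_find_word_patterns find_word_patterns find_word_patterns_alt
  simp only []
  have hv : "aeiouAEIOU".toList = vowelsB := rfl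
  rw [hv, fold_dict]
  rcases (PySem.Str.split₀ sentence).foldl (stepA vowelsB) ([], [], [], []) with ⟨a, b, c, d⟩
  exact (items4 a b c d).symm
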